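-- pv_equiv track=rewrite | github.com/TheNetworker/junos_push_configuration | junos_push/validators.py | _get_config_statistics
-- ===== SOURCE A (Python) =====
-- def _get_config_statistics(content: str) -> dict:
--     """
--     Get statistics about the configuration.
--
--     Args:
--         content: Configuration content
--
--     Returns:
--         Dictionary with configuration statistics
--     """
--     lines = content.split('\n')
--     stats = {
--         'Total commands': len(lines),
--         'Set commands': 0,
--         'Delete commands': 0,
--         'Other commands': 0,
--         'Unique hierarchies': set()
--     }
--
--     for line in lines:
--         if not line.strip():
--             continue
--
--         parts = line.split()
--         command = parts[0].lower()
--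
--         if command == 'set':
--             stats['Set commands'] += 1
--             if len(parts) > 1:
--                 hierarchy = parts[1].split('.')[0]
--                 stats['Unique hierarchies'].add(hierarchy)
--         elif command == 'delete':
--             stats['Delete commands'] += 1
--         else:
--             stats['Other commands'] += 1
--
--     stats['Unique hierarchies'] = len(stats['Unique hierarchies'])
--     return stats
-- ===== SOURCE B (Python) =====
-- def _get_config_statistics(content: str) -> dict:
--     lines = content.split('\n')
--     cmds = [line.split()[0].lower() for line in lines if line.strip()]
--     set_count = cmds.count('set')
--     delete_count = cmds.count('delete')
--     hierarchies = {line.split()[1].split('.')[0]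
--                    for line in lines
--                    if line.strip()
--                    and line.split()[0].lower() == 'set'
--                    and len(line.split()) > 1}
--     return {
--         'Total commands': len(lines),
--         'Set commands': set_count,
--         'Delete commands': delete_count,
--         'Other commands': len(cmds) - set_count - delete_count,
--         'Unique hierarchies': len(hierarchies),
--     }
-- ===== Notes on version B (the rewrite author's own statement) =====
-- stated objective: simpler
-- what changed: Replaced the single loop that mutates a five-field stats record with stateless passes: a list of lowercased first tokens whose count() method gives the two command tallies, the remaining-command tally computed by subtraction from the list length, and the unique hierarchies built by one filtered set comprehension.
import Mathlib
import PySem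

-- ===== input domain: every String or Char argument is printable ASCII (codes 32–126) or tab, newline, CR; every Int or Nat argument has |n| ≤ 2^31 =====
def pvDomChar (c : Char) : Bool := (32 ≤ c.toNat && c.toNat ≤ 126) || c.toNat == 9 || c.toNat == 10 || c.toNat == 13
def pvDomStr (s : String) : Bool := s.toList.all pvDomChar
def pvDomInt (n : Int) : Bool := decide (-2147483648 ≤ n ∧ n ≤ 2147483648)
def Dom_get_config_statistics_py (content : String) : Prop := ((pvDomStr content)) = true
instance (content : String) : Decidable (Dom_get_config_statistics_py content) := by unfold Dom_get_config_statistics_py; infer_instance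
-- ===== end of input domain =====

-- B replaces A's single accumulating loop over a mutable stats record by stateless
-- count/filter/map passes over the line list (objective: simpler — no running state).

-- ===== PORT A =====
-- A's loop state: (set count, delete count, other count, set of hierarchies); the
-- dict holding these named counters in Python is rebuilt from the state at the end.
-- parts[0] is ported as headD "": under the guard strip line ≠ "" the word list is
-- nonempty, so Python's parts[0] cannot raise there; likewise parts[1] under len > 1,
-- and split('\n') / split('.') always return (split? is some: the separator is nonempty).
def pvStepA (st : Int × Int × Int × PySem.Set String) (line : String) :
    Int × Int × Int × PySem.Set String :=
  if PySem.Str.strip line = "" then st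
  else
    let parts := PySem.Str.split₀ line
    let command := PySem.Str.lower (parts.headD "")
    if command = "set" then
      (st.1 + 1, st.2.1, st.2.2.1,
        if parts.length > 1 then
          st.2.2.2.add (((PySem.Str.split? (parts.getD 1 "") ".").getD []).headD "")
        else st.2.2.2)
    else if command = "delete" then
      (st.1, st.2.1 + 1, st.2.2.1, st.2.2.2)
    else
      (st.1, st.2.1, st.2.2.1 + 1, st.2.2.2)

def get_config_statistics_py (content : String) : List (String × Int) :=
  let lines := (PySem.Str.split? content "\n").getD []
  let st := lines.foldl pvStepA (0, 0, 0, PySem.Set.empty)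
  [("Total commands", (lines.length : Int)),
   ("Set commands", st.1),
   ("Delete commands", st.2.1),
   ("Other commands", st.2.2.1),
   ("Unique hierarchies", (st.2.2.2.length : Int))]

-- ===== PORT B =====
def pvCmdOf (line : String) : String :=
  PySem.Str.lower ((PySem.Str.split₀ line).headD "")

def pvCmds (lines : List String) : List String :=
  (lines.filter (fun l => PySem.Str.strip l != "")).map pvCmdOf

def pvHiers (lines : List String) : List String :=
  (lines.filter (fun l =>
      PySem.Str.strip l != "" && pvCmdOf l == "set"
        && decide ((PySem.Str.split₀ l).length > 1))).map
    (fun l => ((PySem.Str.split? ((PySem.Str.split₀ l).getD 1 "") ".").getD []).headD "")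

def get_config_statistics_py_alt (content : String) : List (String × Int) :=
  let lines := (PySem.Str.split? content "\n").getD []
  let cmds := pvCmds lines
  let setC : Int := cmds.count "set"
  let delC : Int := cmds.count "delete"
  let hiers : PySem.Set String := PySem.Set.ofList (pvHiers lines)
  [("Total commands", (lines.length : Int)),
   ("Set commands", setC),
   ("Delete commands", delC),
   ("Other commands", (cmds.length : Int) - setC - delC),
   ("Unique hierarchies", (hiers.length : Int))]

-- ===== PRECONDITION & SPEC =====
def Spec_get_config_statistics_py (content : String) (out : List (String × Int)) : Prop := out = get_config_statistics_py_alt content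
instance (content : String) (out : List (String × Int)) : Decidable (Spec_get_config_statistics_py content out) := by unfold Spec_get_config_statistics_py; infer_instance

-- ===== CLAIM (what is proved, stated in full; the proofs are below) =====
def Claim_equal_get_config_statistics_py : Prop := ∀ (content : String), Dom_get_config_statistics_py content → Spec_get_config_statistics_py content (get_config_statistics_py content)

-- ===== LEMMAS AND PROOFS =====

-- Loop invariant: A's fold over any line list, started from any state, adds exactly
-- B's per-command counts and pushes B's hierarchy keys into the running set.
theorem pv_loop_inv (lines : List String) (a b c : Int) (s : PySem.Set String) :
    lines.foldl pvStepA (a, b, c, s)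
    = (a + ((pvCmds lines).count "set" : Int),
       b + ((pvCmds lines).count "delete" : Int),
       c + (((pvCmds lines).length : Int) - ((pvCmds lines).count "set" : Int)
              - ((pvCmds lines).count "delete" : Int)),
       (pvHiers lines).foldl PySem.Set.add s) := by
  induction lines generalizing a b c s with
  | nil => simp [pvCmds, pvHiers]
  | cons line rest ih =>
    rw [List.foldl_cons]
    by_cases hstrip : PySem.Str.strip line = ""
    · have hcmds : pvCmds (line :: rest) = pvCmds rest := by
        simp [pvCmds, List.filter_cons, hstrip]
      have hh : pvHiers (line :: rest) = pvHiers rest := by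
        simp [pvHiers, List.filter_cons, hstrip]
      rw [show pvStepA (a, b, c, s) line = (a, b, c, s) by simp [pvStepA, hstrip],
        ih, hcmds, hh]
    · have hcmds : pvCmds (line :: rest) = pvCmdOf line :: pvCmds rest := by
        simp [pvCmds, List.filter_cons, hstrip]
      by_cases hset : pvCmdOf line = "set"
      · by_cases hlen : (PySem.Str.split₀ line).length > 1
        · have hh : pvHiers (line :: rest) =
              ((PySem.Str.split? ((PySem.Str.split₀ line).getD 1 "") ".").getD []).headD ""
                :: pvHiers rest := by
            simp [pvHiers, List.filter_cons, hstrip, hset, hlen]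
          rw [show pvStepA (a, b, c, s) line
              = (a + 1, b, c,
                 s.add (((PySem.Str.split? ((PySem.Str.split₀ line).getD 1 "") ".").getD []).headD ""))
            by simp [pvStepA, pvCmdOf] at hset ⊢; simp [hstrip, hset, hlen], ih, hcmds, hh]
          simp [List.count_cons, hset]
          try omega
        · have hh : pvHiers (line :: rest) = pvHiers rest := by
            simp [pvHiers, List.filter_cons, hstrip, hset, hlen]
          rw [show pvStepA (a, b, c, s) line = (a + 1, b, c, s) by
              simp [pvStepA, pvCmdOf] at hset ⊢; simp [hstrip, hset, hlen], ih, hcmds, hh]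
          simp [List.count_cons, hset]
          try omega
      · have hh : pvHiers (line :: rest) = pvHiers rest := by
          simp [pvHiers, List.filter_cons, hstrip, hset]
        by_cases hdel : pvCmdOf line = "delete"
        · rw [show pvStepA (a, b, c, s) line = (a, b + 1, c, s) by
              simp [pvStepA, pvCmdOf] at hset hdel ⊢; simp [hstrip, hset, hdel], ih, hcmds, hh]
          simp [List.count_cons, hset, hdel]
          try omega
        · rw [show pvStepA (a, b, c, s) line = (a, b, c + 1, s) by
              simp [pvStepA, pvCmdOf] at hset hdel ⊢; simp [hstrip, hset, hdel], ih, hcmds, hh]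
          simp [List.count_cons, hset, hdel]
          try omega

-- ===== VERDICT (by name: the statement is the Claim_ definition above) =====
theorem get_config_statistics_py_spec : Claim_equal_get_config_statistics_py := by
  intro content _
  unfold Spec_get_config_statistics_py get_config_statistics_py get_config_statistics_py_alt
  simp only [pv_loop_inv, PySem.Set.ofList, PySem.Set.empty, zero_add]
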